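-- pv_equiv track=rewrite | github.com/maniospas/pySynthesis | synthesis/analysis.py | _deflatten
-- ===== SOURCE A (Python) =====
-- def _is_not_var_symbol(text):
--     valid_symbols = ".,!@#$%^/&*()-+={}[]:\t=<>`'\" "
--     if text in valid_symbols:
--         return True
--     return False
--
-- def _deflatten(expression, variable_expressions):
--     new_expression = ""
--     current_var = ""
--     for c in expression+" ":
--         if _is_not_var_symbol(c):
--             new_expression += variable_expressions.get(current_var, current_var)
--             current_var = ""
--             new_expression += c
--         else:
--             current_var += c
--     return new_expression[:-1]
-- ===== SOURCE B (Python) =====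
-- def _deflatten(expression, variable_expressions):
--     # Two-pointer scanner: slice out each maximal variable run at once, substitute it,
--     # keep the single separator char, join at the end (no char-by-char accumulator,
--     # no trailing-space/[:-1] trick).
--     syms = set(".,!@#$%^/&*()-+={}[]:\t=<>`'\" ")
--     out = []
--     i = 0
--     n = len(expression)
--     while i <= n:
--         j = i
--         while j < n and expression[j] not in syms:
--             j += 1
--         var = expression[i:j]
--         out.append(variable_expressions.get(var, var))
--         if j < n:
--             out.append(expression[j])
--         i = j + 1
--     return "".join(out)
-- ===== Notes on version B (the rewrite author's own statement) =====
-- stated objective: alternative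
-- what changed: Replaces the char-by-char accumulator with its appended-sentinel-space/[:-1] trick by a two-pointer scanner that slices out each maximal variable run, substitutes it via dict.get, keeps the single separator, and joins the collected pieces.
import Mathlib
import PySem

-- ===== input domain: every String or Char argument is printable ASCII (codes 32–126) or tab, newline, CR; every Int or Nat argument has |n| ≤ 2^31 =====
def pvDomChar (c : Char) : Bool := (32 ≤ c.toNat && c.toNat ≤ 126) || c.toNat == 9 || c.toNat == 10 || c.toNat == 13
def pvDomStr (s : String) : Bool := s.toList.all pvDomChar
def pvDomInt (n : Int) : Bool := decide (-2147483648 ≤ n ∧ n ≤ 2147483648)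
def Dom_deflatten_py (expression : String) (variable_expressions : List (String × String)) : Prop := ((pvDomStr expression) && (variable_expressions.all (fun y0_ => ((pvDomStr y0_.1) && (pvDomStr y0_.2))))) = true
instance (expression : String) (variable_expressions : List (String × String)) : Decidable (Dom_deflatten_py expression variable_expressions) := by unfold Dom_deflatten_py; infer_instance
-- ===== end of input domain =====

-- B replaces A's char-by-char accumulator (with its appended-space/[:-1] trick) by a
-- two-pointer scanner that slices out each maximal variable run, substitutes it, and
-- joins the collected pieces; objective: alternative (same O(n) cost).

-- ===== PORT A =====
-- the symbol string ".,!@#$%^/&*()-+={}[]:\t=<>`'\" " from _is_not_var_symbol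
def pvSymbols : List Char := ".,!@#$%^/&*()-+={}[]:\t=<>`'\" ".toList

-- _is_not_var_symbol for a single char: 'text in valid_symbols'
def pvIsNotVarSymbol (c : Char) : Bool :=
  if pvSymbols.contains c then true else false

-- dict.get(k, d) on the association list (first match)
def pvGet (ve : List (String × String)) (k d : String) : String :=
  match ve.find? (fun p => p.1 == k) with
  | some p => p.2
  | none => d

-- the for-loop over expression+" " with state (new_expression, current_var), on List Char
def pvALoop (ve : List (String × String)) :
    List Char → List Char → List Char → List Char × List Char
  | [], newE, cur => (newE, cur)
  | c :: rest, newE, cur =>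
    if pvIsNotVarSymbol c then
      pvALoop ve rest
        (newE ++ (pvGet ve (String.ofList cur) (String.ofList cur)).toList ++ [c]) []
    else
      pvALoop ve rest newE (cur ++ [c])

def deflatten_py (expression : String) (variable_expressions : List (String × String)) : String :=
  String.ofList (PySem.List.slice
    (pvALoop variable_expressions (expression.toList ++ [' ']) [] []).1
    none (some (-1)))   -- new_expression[:-1]

-- ===== PORT B =====
-- inner while loop: advance j while j < n and expression[j] not in syms
def pvBJ (cs : List Char) (j : Nat) : Nat :=
  if h : j < cs.length then
    if pvSymbols.contains cs[j] then j else pvBJ cs (j + 1)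
  else j
termination_by cs.length - j

-- termination fact for the outer loop (the port cites it in decreasing_by)
theorem pvBJ_ge (cs : List Char) (j : Nat) : j ≤ pvBJ cs j := by
  induction j using pvBJ.induct cs with
  | case1 j h hc =>
    have hc' : cs[j] ∈ pvSymbols := by simpa using hc
    rw [pvBJ]; simp [h, hc']
  | case2 j h hc ih =>
    have hc' : cs[j] ∉ pvSymbols := by simpa using hc
    rw [pvBJ]; simp [h, hc']; omega
  | case3 j h => rw [pvBJ]; simp [h]

-- outer while loop: state (i, out)
def pvBLoop (ve : List (String × String)) (cs : List Char) (i : Nat) (out : List String) :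
    List String :=
  if i ≤ cs.length then
    let j := pvBJ cs i
    let var : String := String.ofList (PySem.List.slice cs (some (i : Int)) (some (j : Int)))
    let out1 := out ++ [pvGet ve var var]
    let out2 := if h : j < cs.length then out1 ++ [String.ofList [cs[j]]] else out1
    pvBLoop ve cs (j + 1) out2
  else out
termination_by cs.length + 1 - i
decreasing_by have := pvBJ_ge cs i; omega

def deflatten_py_alt (expression : String) (variable_expressions : List (String × String)) : String :=
  -- "".join(out)
  (pvBLoop variable_expressions expression.toList 0 []).foldl (· ++ ·) ""

-- ===== PRECONDITION & SPEC =====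
def Spec_deflatten_py (expression : String) (variable_expressions : List (String × String)) (out : String) : Prop := out = deflatten_py_alt expression variable_expressions
instance (expression : String) (variable_expressions : List (String × String)) (out : String) : Decidable (Spec_deflatten_py expression variable_expressions out) := by unfold Spec_deflatten_py; infer_instance

-- ===== CLAIM (what is proved, stated in full; the proofs are below) =====
def Claim_equal_deflatten_py : Prop := ∀ (expression : String) (variable_expressions : List (String × String)), Dom_deflatten_py expression variable_expressions → Spec_deflatten_py expression variable_expressions (deflatten_py expression variable_expressions)

-- ===== LEMMAS AND PROOFS =====

-- the common specification: process the remaining chars with the pending run `cur`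
def specFn (ve : List (String × String)) : List Char → List Char → List Char
  | [], cur => (pvGet ve (String.ofList cur) (String.ofList cur)).toList
  | c :: rest, cur =>
    if pvIsNotVarSymbol c then
      (pvGet ve (String.ofList cur) (String.ofList cur)).toList ++ c :: specFn ve rest []
    else
      specFn ve rest (cur ++ [c])

theorem pvALoop_acc (ve : List (String × String)) (cs : List Char) :
    ∀ newE cur, pvALoop ve cs newE cur =
      (newE ++ (pvALoop ve cs [] cur).1, (pvALoop ve cs [] cur).2) := by
  induction cs with
  | nil => intro newE cur; simp [pvALoop]
  | cons c rest ih =>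
    intro newE cur
    by_cases hc : pvIsNotVarSymbol c
    · simp only [pvALoop, hc, if_true, List.nil_append]
      rw [ih, ih ((pvGet ve (String.ofList cur) (String.ofList cur)).toList ++ [c])]
      simp
    · simp only [pvALoop, hc, if_false]
      exact ih newE (cur ++ [c])

theorem pvALoop_spec (ve : List (String × String)) (cs : List Char) :
    ∀ cur, (pvALoop ve (cs ++ [' ']) [] cur).1 = specFn ve cs cur ++ [' '] := by
  induction cs with
  | nil =>
    intro cur
    simp [pvALoop, specFn, show pvIsNotVarSymbol ' ' = true from by decide]
  | cons c rest ih =>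
    intro cur
    by_cases hc : pvIsNotVarSymbol c
    · simp only [List.cons_append, pvALoop, hc, if_true, List.nil_append, specFn]
      rw [pvALoop_acc, ih]
      simp
    · simp only [List.cons_append, pvALoop, hc, if_false, specFn]
      exact ih (cur ++ [c])

theorem deflatten_py_eq_spec (e : String) (ve : List (String × String)) :
    deflatten_py e ve = String.ofList (specFn ve e.toList []) := by
  unfold deflatten_py
  rw [PySem.List.slice_to_neg_one, pvALoop_spec]
  simp

-- B side --------------------------------------------------------------------

def pvNonSym (c : Char) : Bool := !pvSymbols.contains c

theorem pvNonSym_eq (c : Char) : pvNonSym c = !pvIsNotVarSymbol c := by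
  unfold pvNonSym pvIsNotVarSymbol; split <;> simp_all

theorem take_length_takeWhile (p : Char → Bool) (l : List Char) :
    l.take (l.takeWhile p).length = l.takeWhile p := by
  induction l with
  | nil => simp
  | cons c rest ih =>
    by_cases hc : p c <;> simp [List.takeWhile_cons, hc, ih]

theorem drop_length_takeWhile (p : Char → Bool) (l : List Char) :
    l.drop (l.takeWhile p).length = l.dropWhile p := by
  induction l with
  | nil => simp
  | cons c rest ih =>
    by_cases hc : p c <;> simp [List.takeWhile_cons, List.dropWhile_cons, hc, ih]

theorem pvBJ_eq (cs : List Char) (j : Nat) :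
    pvBJ cs j = j + ((cs.drop j).takeWhile pvNonSym).length := by
  induction j using pvBJ.induct cs with
  | case1 j h hc =>
    have hc' : cs[j] ∈ pvSymbols := by simpa using hc
    have ht : (cs.drop j).takeWhile pvNonSym = [] := by
      rw [List.drop_eq_getElem_cons h, List.takeWhile_cons]
      simp [pvNonSym, hc']
    rw [pvBJ]
    simp [h, hc', ht]
  | case2 j h hc ih =>
    have hc' : cs[j] ∉ pvSymbols := by simpa using hc
    have ht : (cs.drop j).takeWhile pvNonSym = cs[j] :: (cs.drop (j + 1)).takeWhile pvNonSym := by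
      rw [List.drop_eq_getElem_cons h, List.takeWhile_cons]
      simp [pvNonSym, hc']
    rw [pvBJ]
    simp [h, hc', ht, ih]
    omega
  | case3 j h =>
    rw [pvBJ]
    have : cs.drop j = [] := List.drop_eq_nil_of_le (by omega)
    simp [h, this]

theorem pvBJ_le (cs : List Char) (j : Nat) (h : j ≤ cs.length) : pvBJ cs j ≤ cs.length := by
  rw [pvBJ_eq]
  have h1 : ((cs.drop j).takeWhile pvNonSym).length ≤ (cs.drop j).length :=
    (List.takeWhile_sublist _).length_le
  simp at h1 ⊢
  omega

theorem specFn_split (ve : List (String × String)) (l : List Char) :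
    ∀ cur, specFn ve l cur =
      (pvGet ve (String.ofList (cur ++ l.takeWhile pvNonSym)) (String.ofList (cur ++ l.takeWhile pvNonSym))).toList ++
      (match l.dropWhile pvNonSym with
       | [] => []
       | c :: r => c :: specFn ve r []) := by
  induction l with
  | nil => intro cur; simp [specFn]
  | cons c rest ih =>
    intro cur
    by_cases hc : pvIsNotVarSymbol c
    · have hs : pvNonSym c = false := by simp [pvNonSym_eq, hc]
      simp [specFn, hc, List.takeWhile_cons, List.dropWhile_cons, hs]
    · have hs : pvNonSym c = true := by simp [pvNonSym_eq, hc]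
      simp only [specFn, hc, if_false, List.takeWhile_cons, List.dropWhile_cons, hs, if_true]
      rw [ih (cur ++ [c])]
      simp

def pvFlat (l : List String) : List Char := (l.map String.toList).flatten

theorem foldl_append_toList (l : List String) :
    ∀ s : String, (l.foldl (· ++ ·) s).toList = s.toList ++ pvFlat l := by
  induction l with
  | nil => intro s; simp [pvFlat]
  | cons a rest ih =>
    intro s
    simp only [List.foldl_cons, ih, pvFlat, List.map_cons, List.flatten_cons]
    simp

theorem pvBLoop_spec (ve : List (String × String)) (cs : List Char) :
    ∀ i out, i ≤ cs.length →
      pvFlat (pvBLoop ve cs i out) = pvFlat out ++ specFn ve (cs.drop i) [] := by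
  intro i out
  induction i, out using pvBLoop.induct ve cs with
  | case1 i out h j var out1 out2 ih =>
    intro _
    have hj := pvBJ_eq cs i
    have hji := pvBJ_ge cs i
    have hjle := pvBJ_le cs i h
    have hvar : PySem.List.slice cs (some (i : Int)) (some ((pvBJ cs i : Nat) : Int)) =
        (cs.drop i).takeWhile pvNonSym := by
      rw [PySem.List.slice_natCast]
      have he : pvBJ cs i - i = ((cs.drop i).takeWhile pvNonSym).length := by omega
      rw [he, take_length_takeWhile]
    have hdropj : cs.drop (pvBJ cs i) = (cs.drop i).dropWhile pvNonSym := by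
      rw [hj, ← List.drop_drop, drop_length_takeWhile]
    rw [pvBLoop]
    simp only [h, if_true]
    rw [specFn_split]
    simp only [List.nil_append]
    by_cases hlt : pvBJ cs i < cs.length
    · have hcons : (cs.drop i).dropWhile pvNonSym = cs[pvBJ cs i] :: cs.drop (pvBJ cs i + 1) := by
        rw [← hdropj]; exact List.drop_eq_getElem_cons hlt
      have ih' := ih (by omega)
      simp only [j, var, out1, out2, hlt, dif_pos] at ih'
      rw [dif_pos hlt, ih', hcons]
      simp [pvFlat, hvar]
    · have hnil : (cs.drop i).dropWhile pvNonSym = [] := by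
        rw [← hdropj]; exact List.drop_eq_nil_of_le (by omega)
      have hstop : pvBLoop ve cs (pvBJ cs i + 1)
          (out ++ [pvGet ve (String.ofList (PySem.List.slice cs (some (i : Int)) (some ((pvBJ cs i : Nat) : Int))))
                     (String.ofList (PySem.List.slice cs (some (i : Int)) (some ((pvBJ cs i : Nat) : Int))))]) =
          out ++ [pvGet ve (String.ofList (PySem.List.slice cs (some (i : Int)) (some ((pvBJ cs i : Nat) : Int))))
                     (String.ofList (PySem.List.slice cs (some (i : Int)) (some ((pvBJ cs i : Nat) : Int))))] := by
        rw [pvBLoop]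
        simp [show ¬(pvBJ cs i + 1 ≤ cs.length) by omega]
      rw [dif_neg hlt, hstop, hnil]
      simp [pvFlat, hvar]
  | case2 i out h => intro hi; omega

theorem deflatten_py_alt_eq_spec (e : String) (ve : List (String × String)) :
    deflatten_py_alt e ve = String.ofList (specFn ve e.toList []) := by
  have h := pvBLoop_spec ve e.toList 0 [] (by omega)
  have h2 := foldl_append_toList (pvBLoop ve e.toList 0 []) ""
  rw [h] at h2
  simp only [pvFlat, List.map_nil, List.flatten_nil, List.nil_append, List.drop_zero] at h2
  unfold deflatten_py_alt
  apply String.toList_inj.mp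
  rw [h2]
  simp

-- ===== VERDICT (by name: the statement is the Claim_ definition above) =====
theorem deflatten_py_spec : Claim_equal_deflatten_py := by
  intro e ve _
  unfold Spec_deflatten_py
  rw [deflatten_py_eq_spec, deflatten_py_alt_eq_spec]
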